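-- pv_equiv track=rewrite | github.com/gadgilrajeev/memory_dump | app.py | get_axis_values
-- ===== SOURCE A (Python) =====
-- def get_axis_values(page_count,start_value,chunk_size,num_columns,num_values):
--     for i in range(page_count):
--         x_ticktext = [f'{hex(i)}' for i in range(start_value,start_value+num_columns)]
--         y_ticktext = [hex(start_value + i * num_columns) for i in range(num_values)]
--         y_ticktext=list(reversed(y_ticktext))
--         last_value= ((start_value+num_columns)*chunk_size)-(start_value*chunk_size)+(start_value-1)
--         oldstart_value = start_value
--         start_value=last_value+1
--     return x_ticktext ,y_ticktext , last_value,start_value,oldstart_value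
-- ===== SOURCE B (Python) =====
-- def get_axis_values(page_count, start_value, chunk_size, num_columns, num_values):
--     # closed-form final start of the last page: each page advances start by num_columns*chunk_size
--     step = num_columns * chunk_size
--     old = start_value + (page_count - 1) * step
--     x_ticktext = [hex(v) for v in range(old, old + num_columns)]
--     y_ticktext = [hex(old + i * num_columns) for i in range(num_values - 1, -1, -1)]
--     return x_ticktext, y_ticktext, old + step - 1, old + step, old
-- ===== Notes on version B (the rewrite author's own statement) =====
-- stated objective: faster
-- what changed: Replaced the per-page loop (which rebuilds both tick lists every iteration and only keeps the last) by a closed-form computation of the last page's start value, building each list exactly once (y built directly back-to-front).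
import Mathlib
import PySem

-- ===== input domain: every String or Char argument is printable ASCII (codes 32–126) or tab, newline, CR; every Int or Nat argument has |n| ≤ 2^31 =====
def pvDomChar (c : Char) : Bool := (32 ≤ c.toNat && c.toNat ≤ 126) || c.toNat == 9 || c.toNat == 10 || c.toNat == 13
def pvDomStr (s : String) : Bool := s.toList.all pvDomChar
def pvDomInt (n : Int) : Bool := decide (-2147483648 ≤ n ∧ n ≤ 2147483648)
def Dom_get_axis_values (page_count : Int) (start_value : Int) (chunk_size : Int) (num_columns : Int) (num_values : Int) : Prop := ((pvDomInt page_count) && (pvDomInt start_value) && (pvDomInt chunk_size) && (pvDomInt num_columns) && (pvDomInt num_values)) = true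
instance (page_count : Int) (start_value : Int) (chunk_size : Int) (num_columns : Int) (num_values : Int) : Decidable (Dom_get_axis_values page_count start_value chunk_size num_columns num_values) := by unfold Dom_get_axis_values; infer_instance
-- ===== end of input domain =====

-- B replaces A's per-page loop (rebuilding both tick lists each page, keeping only the last)
-- by a closed-form last-page start value and builds each list once: asymptotically faster.


-- Python's hex(): '0x'/-'0x' prefix, lowercase hex digits (exact for all Int)
def pyHex (n : Int) : String :=
  if n < 0 then "-0x" ++ String.ofList (Nat.toDigits 16 (-n).toNat)
  else "0x" ++ String.ofList (Nat.toDigits 16 n.toNat)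

-- ===== PORT A =====
-- loop body of A: state = (x_ticktext, y_ticktext, last_value, start_value, oldstart_value);
-- the body only reads start_value (component .2.2.2.1)
def pvStepA (chunk_size num_columns num_values : Int)
    (st : List String × List String × Int × Int × Int) (_i : Int) :
    List String × List String × Int × Int × Int :=
  let s := st.2.2.2.1
  let x_ticktext := (PySem.List.pyRange s (s + num_columns) 1).map (fun i => pyHex i)
  let y_ticktext := (PySem.List.pyRange 0 num_values 1).map (fun i => pyHex (s + i * num_columns))
  let y_ticktext := y_ticktext.reverse
  let last_value := ((s + num_columns) * chunk_size) - (s * chunk_size) + (s - 1)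
  (x_ticktext, y_ticktext, last_value, last_value + 1, s)

def get_axis_values (page_count : Int) (start_value : Int) (chunk_size : Int) (num_columns : Int) (num_values : Int) : List String × List String × Int × Int × Int :=
  -- the dummy initial components are never returned under Pre_ (page_count ≥ 1);
  -- in Python the variables would be unbound there (NameError)
  (PySem.List.pyRange 0 page_count 1).foldl
    (pvStepA chunk_size num_columns num_values)
    ([], [], 0, start_value, 0)

-- ===== PORT B =====
def get_axis_values_alt (page_count : Int) (start_value : Int) (chunk_size : Int) (num_columns : Int) (num_values : Int) : List String × List String × Int × Int × Int :=
  let step := num_columns * chunk_size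
  let old := start_value + (page_count - 1) * step
  let x_ticktext := (PySem.List.pyRange old (old + num_columns) 1).map (fun v => pyHex v)
  let y_ticktext := (PySem.List.pyRange (num_values - 1) (-1) (-1)).map (fun i => pyHex (old + i * num_columns))
  (x_ticktext, y_ticktext, old + step - 1, old + step, old)

-- ===== PRECONDITION & SPEC =====
-- Pre_ excludes page_count ≤ 0: the for-loop body never runs and A raises NameError
def Pre_get_axis_values (page_count : Int) (start_value : Int) (chunk_size : Int) (num_columns : Int) (num_values : Int) : Prop := 1 ≤ page_count
instance (page_count : Int) (start_value : Int) (chunk_size : Int) (num_columns : Int) (num_values : Int) : Decidable (Pre_get_axis_values page_count start_value chunk_size num_columns num_values) := by unfold Pre_get_axis_values; infer_instance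
def pvWitness_get_axis_values : Int × Int × Int × Int × Int := (3, 5, 2, 4, 3)

def Spec_get_axis_values (page_count : Int) (start_value : Int) (chunk_size : Int) (num_columns : Int) (num_values : Int) (out : List String × List String × Int × Int × Int) : Prop := out = get_axis_values_alt page_count start_value chunk_size num_columns num_values
instance (page_count : Int) (start_value : Int) (chunk_size : Int) (num_columns : Int) (num_values : Int) (out : List String × List String × Int × Int × Int) : Decidable (Spec_get_axis_values page_count start_value chunk_size num_columns num_values out) := by unfold Spec_get_axis_values; infer_instance

-- ===== CLAIM (what is proved, stated in full; the proofs are below) =====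
def Claim_equal_get_axis_values : Prop := ∀ (page_count : Int) (start_value : Int) (chunk_size : Int) (num_columns : Int) (num_values : Int), Dom_get_axis_values page_count start_value chunk_size num_columns num_values → Pre_get_axis_values page_count start_value chunk_size num_columns num_values → Spec_get_axis_values page_count start_value chunk_size num_columns num_values (get_axis_values page_count start_value chunk_size num_columns num_values)

-- ===== LEMMAS AND PROOFS =====

-- A's loop body ignores the loop index, so the fold is an iterate of the unary body
theorem foldl_stepA_const (c nc nv : Int) (l : List Int) (st : List String × List String × Int × Int × Int) :
    l.foldl (pvStepA c nc nv) st = (fun st => pvStepA c nc nv st 0)^[l.length] st := by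
  induction l generalizing st with
  | nil => simp
  | cons a l ih => simp only [List.foldl_cons, List.length_cons, Function.iterate_succ_apply, ih]; rfl

-- one iteration of A's body in closed form (y's reverse fused into a countdown range)
theorem stepA_closed (c nc nv s : Int) :
    pvStepA c nc nv ([], [], 0, s, 0) 0 =
      ((PySem.List.pyRange s (s + nc) 1).map (fun v => pyHex v),
       (PySem.List.pyRange (nv - 1) (-1) (-1)).map (fun i => pyHex (s + i * nc)),
       s + nc * c - 1, s + nc * c, s) := by
  have hy : PySem.List.pyRange (nv - 1) (-1) (-1) = (PySem.List.pyRange 0 nv 1).reverse := by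
    rw [PySem.List.pyRange_neg_one_eq_reverse]; norm_num
  simp only [pvStepA, hy, List.map_reverse]
  refine Prod.ext rfl (Prod.ext rfl ?_)
  refine Prod.ext ?_ (Prod.ext ?_ rfl) <;> simp <;> ring

-- n+1 iterations of A's body: only the last iteration's lists survive, and the
-- running start_value has advanced by n * (num_columns * chunk_size)
theorem stepA_iterate (c nc nv : Int) (n : Nat) (x y : List String) (lv s o : Int) :
    (fun st => pvStepA c nc nv st 0)^[n + 1] (x, y, lv, s, o) =
      pvStepA c nc nv ([], [], 0, s + n * (nc * c), 0) 0 := by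
  induction n generalizing x y lv s o with
  | zero => simp [pvStepA]
  | succ n ih =>
      rw [Function.iterate_succ_apply]
      show (fun st => pvStepA c nc nv st 0)^[n + 1] (pvStepA c nc nv (x, y, lv, s, o) 0) = _
      rw [pvStepA, ih]
      have h : ((s + nc) * c - s * c + (s - 1) + 1) + (n : Int) * (nc * c)
           = s + ((n : Nat) + 1 : Nat) * (nc * c) := by push_cast; ring
      rw [h]

theorem get_axis_values_eq (p s c nc nv : Int) (hp : 1 ≤ p) :
    get_axis_values p s c nc nv = get_axis_values_alt p s c nc nv := by
  unfold get_axis_values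
  rw [foldl_stepA_const, PySem.List.length_pyRange_one]
  obtain ⟨n, hn⟩ : ∃ n : Nat, (p - 0).toNat = n + 1 := ⟨(p - 0).toNat - 1, by omega⟩
  rw [hn, stepA_iterate, stepA_closed]
  have hs : s + (n : Int) * (nc * c) = s + (p - 1) * (nc * c) := by
    have : (n : Int) = p - 1 := by omega
    rw [this]
  unfold get_axis_values_alt
  rw [hs]

-- ===== VERDICT (by name: the statement is the Claim_ definition above) =====
theorem get_axis_values_spec : Claim_equal_get_axis_values := by
  intro p s c nc nv _ hpre
  unfold Spec_get_axis_values
  exact get_axis_values_eq p s c nc nv hpre
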